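-- pv_equiv track=rewrite | github.com/sir-wombat/curipaca | funktionen.py | kombiniere_listen
-- ===== SOURCE A (Python) =====
-- def ohne_duplikate(eingangsliste):
--     ausgangsliste = []
--     adressenliste = []
--     for i in eingangsliste:
--         if i[0] not in adressenliste:
--             ausgangsliste.append(i)
--             adressenliste.append(i[0])
--         else:
--             for j in ausgangsliste:
--                 if j[0] == i[0]:
--                     for k in i[1:]:
--                         j.append(k)
--     return ausgangsliste
--
-- def kombiniere_listen(listenliste):
--     masterliste = []
--     for liste in listenliste:
--         for i in liste:
--             masterliste.append(i)
--     masterliste = ohne_duplikate(masterliste)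
--     masterliste = sorted(masterliste)       # sortieren
--     return masterliste
-- ===== SOURCE B (Python) =====
-- def kombiniere_listen(listenliste):
--     # Sort-then-scan: stably sort the flattened entries by first element once,
--     # then merge each run of equal first elements in a single pass -- no
--     # quadratic membership/rescan over the result and no second sort of the
--     # merged groups (distinct first elements already give the final order).
--     # Unlike A, the input's inner lists are not mutated.
--     flach = sorted((e for liste in listenliste for e in liste),
--                    key=lambda e: e[0])
--     ergebnis = []
--     gruppe = None
--     for e in flach:
--         if gruppe is not None and e[0] == gruppe[0]:
--             gruppe.extend(e[1:])
--         else: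
--             if gruppe is not None:
--                 ergebnis.append(gruppe)
--             gruppe = list(e)
--     if gruppe is not None:
--         ergebnis.append(gruppe)
--     return ergebnis
-- ===== Notes on version B (the rewrite author's own statement) =====
-- stated objective: faster
-- what changed: Instead of A's merge-then-sort (quadratic first-occurrence grouping with a membership list and a full rescan of the result per duplicate, then a sort of the groups), B sorts the flattened entries once, stably, by first element and merges each run of equal first elements in one linear scan; the runs come out already in final order, so no second sort is needed; B builds fresh group lists instead of mutating the input's inner lists in place (return value identical).
import Mathlib
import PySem

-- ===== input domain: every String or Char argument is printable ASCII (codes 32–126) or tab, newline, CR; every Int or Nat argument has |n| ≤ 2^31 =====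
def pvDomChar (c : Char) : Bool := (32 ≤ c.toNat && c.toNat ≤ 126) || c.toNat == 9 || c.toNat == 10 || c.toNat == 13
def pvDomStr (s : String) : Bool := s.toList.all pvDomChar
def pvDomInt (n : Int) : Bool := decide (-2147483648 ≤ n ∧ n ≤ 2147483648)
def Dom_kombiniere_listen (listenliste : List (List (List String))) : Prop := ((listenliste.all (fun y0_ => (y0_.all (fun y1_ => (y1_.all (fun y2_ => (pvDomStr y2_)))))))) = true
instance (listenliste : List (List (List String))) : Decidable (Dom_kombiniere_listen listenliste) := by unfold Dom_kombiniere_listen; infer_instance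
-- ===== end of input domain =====

-- B sorts the flattened entries once (stably, by first element) and merges each run of equal
-- first elements in a single linear scan, instead of A's quadratic first-occurrence grouping
-- followed by a second sort; equivalence is about the RETURN value only — A mutates the
-- input's inner lists in place, B does not.

-- ===== PORT A =====

-- i[0] (raises IndexError on an empty entry — excluded by Pre_; `""` is never reached there)
def pvHead0 (i : List String) : String := (PySem.List.pyGet? i 0).getD ""

-- one iteration of A's loop over eingangsliste; state = (ausgangsliste, adressenliste)
def pvOhneDupStep (s : List (List String) × List String) (i : List String) :
    List (List String) × List String :=
  if pvHead0 i ∉ s.2 then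
    (s.1 ++ [i], s.2 ++ [pvHead0 i])
  else
    -- `for j in ausgangsliste: if j[0] == i[0]: for k in i[1:]: j.append(k)`
    (s.1.map (fun j => if pvHead0 j == pvHead0 i then j ++ i.drop 1 else j), s.2)

def ohne_duplikate (eingangsliste : List (List String)) : List (List String) :=
  (eingangsliste.foldl pvOhneDupStep ([], [])).1

def kombiniere_listen (listenliste : List (List (List String))) : List (List String) :=
  let masterliste :=
    listenliste.foldl (fun m liste => liste.foldl (fun m i => m ++ [i]) m) []
  PySem.List.sorted (ohne_duplikate masterliste) (fun x => x) false

-- ===== PORT B =====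

-- one iteration of B's loop over flach; state = (ergebnis, gruppe)
def pvSchritt (s : List (List String) × Option (List String)) (e : List String) :
    List (List String) × Option (List String) :=
  match s.2 with
  | some g =>
      if pvHead0 e == pvHead0 g then (s.1, some (g ++ e.drop 1))
      else (s.1 ++ [g], some e)
  | none => (s.1, some e)

-- trailing `if gruppe is not None: ergebnis.append(gruppe)`
def pvFinish (s : List (List String) × Option (List String)) : List (List String) :=
  match s.2 with
  | some g => s.1 ++ [g]
  | none => s.1

def kombiniere_listen_alt (listenliste : List (List (List String))) : List (List String) :=
  let flach :=
    PySem.List.sorted (listenliste.flatMap (fun liste => liste)) (fun e => pvHead0 e) false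
  pvFinish (flach.foldl pvSchritt ([], none))

-- ===== PRECONDITION & SPEC =====
-- Pre_ excludes inputs containing an empty entry, on which both Pythons raise IndexError at `[0]`.
def Pre_kombiniere_listen (listenliste : List (List (List String))) : Prop :=
  ∀ liste ∈ listenliste, ∀ i ∈ liste, i ≠ []
instance (listenliste : List (List (List String))) : Decidable (Pre_kombiniere_listen listenliste) := by unfold Pre_kombiniere_listen; infer_instance

def pvWitness_kombiniere_listen : List (List (List String)) :=
  [[["a", "x"], ["b"]], [["a", "y"], ["c", "z"]]]

def Spec_kombiniere_listen (listenliste : List (List (List String))) (out : List (List String)) : Prop := out = kombiniere_listen_alt listenliste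
instance (listenliste : List (List (List String))) (out : List (List String)) : Decidable (Spec_kombiniere_listen listenliste out) := by unfold Spec_kombiniere_listen; infer_instance

-- ===== CLAIM (what is proved, stated in full; the proofs are below) =====
def Claim_equal_kombiniere_listen : Prop := ∀ (listenliste : List (List (List String))), Dom_kombiniere_listen listenliste → Pre_kombiniere_listen listenliste → Spec_kombiniere_listen listenliste (kombiniere_listen listenliste)

-- ===== LEMMAS AND PROOFS =====

-- the merged group of all entries of `flat` whose first element is k
def pvGrp (flat : List (List String)) (k : String) : List String :=
  match flat.filter (fun e => pvHead0 e == k) with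
  | [] => []
  | e :: es => e ++ es.flatMap (fun x => x.drop 1)

def pvHeads (l : List (List String)) : List String := l.map pvHead0

-- A's loop state after having processed the prefix p
def pvState (p : List (List String)) : List (List String) × List String :=
  ((PySem.Set.ofList (pvHeads p)).map (pvGrp p), PySem.Set.ofList (pvHeads p))

theorem pvHead0_cons (a : String) (l : List String) : pvHead0 (a :: l) = a := by
  simp [pvHead0, PySem.List.pyGet?, PySem.List.pyIdx?]

theorem pvHead0_append (j t : List String) (h : j ≠ []) : pvHead0 (j ++ t) = pvHead0 j := by
  cases j with
  | nil => exact absurd rfl h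
  | cons a l => simp [pvHead0_cons]

theorem pvGrp_head (flat : List (List String)) (k : String)
    (hne : ∀ e ∈ flat, e ≠ []) (hk : k ∈ pvHeads flat) :
    ∃ t, pvGrp flat k = k :: t := by
  obtain ⟨e, he, hek⟩ := List.mem_map.mp hk
  have hef : e ∈ flat.filter (fun e => pvHead0 e == k) :=
    List.mem_filter.mpr ⟨he, by simp [hek]⟩
  unfold pvGrp
  cases hf : flat.filter (fun e => pvHead0 e == k) with
  | nil => rw [hf] at hef; cases hef
  | cons e0 es =>
    have he0 : e0 ∈ flat.filter (fun e => pvHead0 e == k) := hf ▸ List.mem_cons_self ..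
    have h1 : pvHead0 e0 = k := by simpa using (List.mem_filter.mp he0).2
    have h2 : e0 ≠ [] := hne e0 (List.mem_filter.mp he0).1
    cases e0 with
    | nil => exact absurd rfl h2
    | cons c t =>
      rw [pvHead0_cons] at h1
      subst h1
      exact ⟨t ++ es.flatMap (fun x => x.drop 1), by simp⟩

theorem pvGrp_append_ne (flat : List (List String)) (i : List String) (k : String)
    (h : pvHead0 i ≠ k) : pvGrp (flat ++ [i]) k = pvGrp flat k := by
  unfold pvGrp
  rw [List.filter_append]
  have : List.filter (fun e => pvHead0 e == k) [i] = [] := by simp [h]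
  rw [this, List.append_nil]

theorem pvGrp_append_eq (flat : List (List String)) (i : List String)
    (hk : pvHead0 i ∈ pvHeads flat) :
    pvGrp (flat ++ [i]) (pvHead0 i) = pvGrp flat (pvHead0 i) ++ i.drop 1 := by
  obtain ⟨e, he, hek⟩ := List.mem_map.mp hk
  have hef : e ∈ flat.filter (fun e => pvHead0 e == pvHead0 i) :=
    List.mem_filter.mpr ⟨he, by simp [hek]⟩
  unfold pvGrp
  rw [List.filter_append]
  cases hf : flat.filter (fun e => pvHead0 e == pvHead0 i) with
  | nil => rw [hf] at hef; cases hef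
  | cons e0 es => simp

theorem pvGrp_append_new (flat : List (List String)) (i : List String)
    (hk : pvHead0 i ∉ pvHeads flat) :
    pvGrp (flat ++ [i]) (pvHead0 i) = i := by
  have hf : flat.filter (fun e => pvHead0 e == pvHead0 i) = [] := by
    rw [List.filter_eq_nil_iff]
    intro e he hbe
    exact hk (List.mem_map.mpr ⟨e, he, by simpa using hbe⟩)
  unfold pvGrp
  rw [List.filter_append, hf]
  simp

theorem pvAStep (p : List (List String)) (i : List String)
    (hp : ∀ e ∈ p, e ≠ []) (hi : i ≠ []) :
    pvOhneDupStep (pvState p) i = pvState (p ++ [i]) := by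
  have hne : ∀ e ∈ p ++ [i], e ≠ [] := by
    intro e he
    rcases List.mem_append.mp he with h | h
    · exact hp e h
    · simpa using (List.mem_singleton.mp h) ▸ hi
  have hhds : pvHeads (p ++ [i]) = pvHeads p ++ [pvHead0 i] := by
    simp [pvHeads]
  by_cases hmem : pvHead0 i ∈ pvHeads p
  · have hmem' : pvHead0 i ∈ PySem.Set.ofList (pvHeads p) :=
      (PySem.Set.mem_ofList _ _).mpr hmem
    have hset : PySem.Set.ofList (pvHeads (p ++ [i])) = PySem.Set.ofList (pvHeads p) := by
      rw [hhds, PySem.Set.ofList_append_singleton, PySem.Set.add_of_mem hmem']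
    unfold pvOhneDupStep pvState
    rw [if_neg (by simpa using hmem'), hset]
    refine Prod.ext ?_ rfl
    simp only [List.map_map]
    apply List.map_congr_left
    intro k hk
    have hkp : k ∈ pvHeads p := (PySem.Set.mem_ofList _ _).mp hk
    obtain ⟨t, hgt⟩ := pvGrp_head p k hp hkp
    have hh : pvHead0 (pvGrp p k) = k := by rw [hgt, pvHead0_cons]
    by_cases hki : k = pvHead0 i
    · subst hki
      simp only [Function.comp_apply, hh, beq_self_eq_true, if_true]
      exact (pvGrp_append_eq p i hmem).symm
    · simp only [Function.comp_apply, hh]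
      rw [if_neg (by simp [hki])]
      exact (pvGrp_append_ne p i k (fun h => hki h.symm)).symm
  · have hmem' : pvHead0 i ∉ PySem.Set.ofList (pvHeads p) := fun h =>
      hmem ((PySem.Set.mem_ofList _ _).mp h)
    have hset : PySem.Set.ofList (pvHeads (p ++ [i]))
        = PySem.Set.ofList (pvHeads p) ++ [pvHead0 i] := by
      rw [hhds, PySem.Set.ofList_append_singleton, PySem.Set.add_of_not_mem hmem']
    unfold pvOhneDupStep pvState
    rw [if_pos (by simpa using hmem'), hset]
    refine Prod.ext ?_ rfl
    show List.map (pvGrp p) (PySem.Set.ofList (pvHeads p)) ++ [i]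
        = List.map (pvGrp (p ++ [i])) (PySem.Set.ofList (pvHeads p) ++ [pvHead0 i])
    rw [List.map_append]
    congr 1
    · apply List.map_congr_left
      intro k hk
      have hkp : k ∈ pvHeads p := (PySem.Set.mem_ofList _ _).mp hk
      exact (pvGrp_append_ne p i k (fun h => hmem (h ▸ hkp))).symm
    · simpa using (pvGrp_append_new p i hmem).symm

theorem pvAInv (r : List (List String)) :
    ∀ p : List (List String), (∀ e ∈ p, e ≠ []) → (∀ e ∈ r, e ≠ []) →
    r.foldl pvOhneDupStep (pvState p) = pvState (p ++ r) := by
  induction r with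
  | nil => intro p _ _; simp
  | cons i t ih =>
    intro p hp hr
    have hi : i ≠ [] := hr i (List.mem_cons_self ..)
    rw [List.foldl_cons, pvAStep p i hp hi,
      ih (p ++ [i])
        (by intro e he
            rcases List.mem_append.mp he with h | h
            · exact hp e h
            · simpa using (List.mem_singleton.mp h) ▸ hi)
        (fun e he => hr e (List.mem_cons_of_mem _ he))]
    simp

theorem pvAChar (flat : List (List String)) (h : ∀ e ∈ flat, e ≠ []) :
    ohne_duplikate flat = (PySem.Set.ofList (pvHeads flat)).map (pvGrp flat) := by
  have h0 : pvState [] = ([], []) := by simp [pvState, pvHeads, PySem.Set.ofList]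
  unfold ohne_duplikate
  rw [← h0, pvAInv flat [] (by simp) h]
  simp [pvState]

-- A's hand-rolled flatten equals B's flatMap
theorem pvFlatten (listenliste : List (List (List String))) :
    listenliste.foldl (fun m liste => liste.foldl (fun m i => m ++ [i]) m) []
      = listenliste.flatMap (fun liste => liste) := by
  have h : ∀ (L : List (List (List String))) (acc : List (List String)),
      L.foldl (fun m liste => liste.foldl (fun m i => m ++ [i]) m) acc
        = acc ++ L.flatMap (fun liste => liste) := by
    intro L
    induction L with
    | nil => simp
    | cons liste t ih =>
      intro acc
      rw [List.foldl_cons, PySem.List.foldl_append_singleton, ih, List.flatMap_cons,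
        List.append_assoc]
  simpa using h listenliste []

-- stability of the sort: filtering one key class commutes with sorting
theorem pvInsertFilter (x : List String) (k : String) (acc : List (List String))
    (h : acc.Pairwise (fun a b => pvHead0 a ≤ pvHead0 b)) :
    (PySem.List.insertBy (fun a b => decide (pvHead0 a < pvHead0 b)) x acc).filter
        (fun e => pvHead0 e == k)
      = if pvHead0 x == k then acc.filter (fun e => pvHead0 e == k) ++ [x]
        else acc.filter (fun e => pvHead0 e == k) := by
  induction acc with
  | nil => by_cases hxk : pvHead0 x == k <;> simp [PySem.List.insertBy, hxk]
  | cons y ys ih =>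
    obtain ⟨hy, hys⟩ := List.pairwise_cons.mp h
    by_cases hlt : pvHead0 x < pvHead0 y
    · rw [show PySem.List.insertBy (fun a b => decide (pvHead0 a < pvHead0 b)) x (y :: ys)
          = x :: y :: ys by simp [PySem.List.insertBy, hlt]]
      by_cases hxk : (pvHead0 x == k) = true
      · have hk : pvHead0 x = k := by simpa using hxk
        have hnil : (y :: ys).filter (fun e => pvHead0 e == k) = [] := by
          rw [List.filter_eq_nil_iff]
          intro e he hbe
          have h1 : pvHead0 e = k := by simpa using hbe
          have h2 : pvHead0 y ≤ pvHead0 e := by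
            rcases List.mem_cons.mp he with h | h
            · exact h ▸ le_refl _
            · exact hy e h
          rw [h1, ← hk] at h2
          exact absurd (lt_of_lt_of_le hlt h2) (lt_irrefl _)
        rw [if_pos hxk, hnil]
        simp only [List.filter_cons, hxk, if_true, hnil]
        simp
      · rw [if_neg hxk]
        simp only [List.filter_cons, hxk]
        simp
    · rw [show PySem.List.insertBy (fun a b => decide (pvHead0 a < pvHead0 b)) x (y :: ys)
          = y :: PySem.List.insertBy (fun a b => decide (pvHead0 a < pvHead0 b)) x ys
          by simp [PySem.List.insertBy, hlt]]
      rw [List.filter_cons, List.filter_cons, ih hys]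
      by_cases hxk : (pvHead0 x == k) = true <;> by_cases hyk : (pvHead0 y == k) = true <;>
        simp [hxk, hyk]

theorem pvSortedFilter (xs : List (List String)) (k : String) :
    (PySem.List.sorted xs pvHead0 false).filter (fun e => pvHead0 e == k)
      = xs.filter (fun e => pvHead0 e == k) := by
  induction xs using List.reverseRecOn with
  | nil => simp [PySem.List.sorted]
  | append_singleton ys x ih =>
    rw [PySem.List.sorted_eq_foldl_insertBy, List.foldl_append, List.foldl_cons, List.foldl_nil,
      ← PySem.List.sorted_eq_foldl_insertBy]
    rw [pvInsertFilter x k _ (by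
      have := PySem.List.sorted_pairwise ys pvHead0
      exact this)]
    rw [ih, List.filter_append]
    by_cases hxk : (pvHead0 x == k) = true <;> simp [hxk]

theorem pvGrp_cons_ne (r : List (List String)) (e : List String) (k : String)
    (h : pvHead0 e ≠ k) : pvGrp (e :: r) k = pvGrp r k := by
  unfold pvGrp
  rw [List.filter_cons, if_neg (by simp [h])]

theorem pvGrp_cons_eq (r : List (List String)) (e : List String) :
    pvGrp (e :: r) (pvHead0 e)
      = e ++ (r.filter (fun x => pvHead0 x == pvHead0 e)).flatMap (fun x => x.drop 1) := by
  unfold pvGrp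
  rw [List.filter_cons, if_pos (by simp)]

theorem pvOfListDup (a : String) (l : List String) :
    PySem.Set.ofList (a :: a :: l) = PySem.Set.ofList (a :: l) := by
  rw [PySem.Set.ofList_cons, PySem.Set.ofList_cons (x := a) (xs := l)]
  simp [PySem.Set.discard, List.filter_filter]

theorem pvOfListFresh (a : String) (l : List String) (h : ∀ x ∈ l, x ≠ a) :
    PySem.Set.ofList (a :: l) = a :: PySem.Set.ofList l := by
  rw [PySem.Set.ofList_cons]
  congr 1
  apply List.filter_eq_self.mpr
  intro y hy
  simpa using h y ((PySem.Set.mem_ofList _ _).mp hy)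

-- B's merge loop on a head-sorted list, with a partially merged current group
theorem pvRun (rest : List (List String)) :
    ∀ (acc : List (List String)) (g : List String), g ≠ [] → (∀ e ∈ rest, e ≠ []) →
    (pvHeads rest).Pairwise (· ≤ ·) → (∀ e ∈ rest, pvHead0 g ≤ pvHead0 e) →
    pvFinish (rest.foldl pvSchritt (acc, some g))
      = acc ++ (PySem.Set.ofList (pvHead0 g :: pvHeads rest)).map
          (fun k => if k == pvHead0 g then
              g ++ (rest.filter (fun e => pvHead0 e == k)).flatMap (fun x => x.drop 1)
            else pvGrp rest k) := by
  induction rest with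
  | nil =>
    intro acc g hg _ _ _
    rw [List.foldl_nil]
    show acc ++ [g] = _
    have h0 : PySem.Set.ofList (pvHead0 g :: pvHeads []) = [pvHead0 g] := rfl
    rw [h0]
    simp
  | cons e r ih =>
    intro acc g hg hne hp hge
    have hee : e ≠ [] := hne e (List.mem_cons_self ..)
    have hrne : ∀ x ∈ r, x ≠ [] := fun x hx => hne x (List.mem_cons_of_mem _ hx)
    have hheads : pvHeads (e :: r) = pvHead0 e :: pvHeads r := rfl
    obtain ⟨hhe, hpr⟩ := List.pairwise_cons.mp (hheads ▸ hp)
    have hger : ∀ x ∈ r, pvHead0 e ≤ pvHead0 x := by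
      intro x hx
      exact hhe (pvHead0 x) (List.mem_map.mpr ⟨x, hx, rfl⟩)
    rw [List.foldl_cons]
    by_cases heq : pvHead0 e = pvHead0 g
    · have hstep : pvSchritt (acc, some g) e = (acc, some (g ++ e.drop 1)) := by
        simp [pvSchritt, heq]
      have hg' : g ++ e.drop 1 ≠ [] := fun hc => hg (List.append_eq_nil_iff.mp hc).1
      have hgh : pvHead0 (g ++ e.drop 1) = pvHead0 g := pvHead0_append g _ hg
      rw [hstep, ih acc (g ++ e.drop 1) hg' hrne hpr
        (by intro x hx; rw [hgh, ← heq]; exact hger x hx)]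
      congr 1
      rw [hgh, hheads, heq, pvOfListDup]
      apply List.map_congr_left
      intro k hk
      have hk' : k ∈ pvHead0 g :: pvHeads r := (PySem.Set.mem_ofList _ _).mp hk
      by_cases hkg : k = pvHead0 g
      · subst hkg
        rw [if_pos (by simp), if_pos (by simp)]
        rw [List.filter_cons, if_pos (by simp [heq])]
        simp [List.append_assoc]
      · rw [if_neg (by simp [hkg]), if_neg (by simp [hkg])]
        exact (pvGrp_cons_ne r e k (by intro h; exact hkg (by rw [← h, heq]))).symm
    · have hgle : pvHead0 g ≤ pvHead0 e := hge e (List.mem_cons_self ..)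
      have hglt : pvHead0 g < pvHead0 e := lt_of_le_of_ne hgle (fun h => heq h.symm)
      have hstep : pvSchritt (acc, some g) e = (acc ++ [g], some e) := by
        simp [pvSchritt, heq]
      have hgnot : ∀ x ∈ pvHead0 e :: pvHeads r, x ≠ pvHead0 g := by
        intro x hx
        rcases List.mem_cons.mp hx with h | h
        · exact h ▸ fun hc => absurd (hc ▸ hglt) (lt_irrefl _)
        · intro hc
          have := hhe x h
          rw [hc] at this
          exact absurd (lt_of_lt_of_le hglt this) (lt_irrefl _)
      rw [hstep, ih (acc ++ [g]) e hee hrne hpr hger]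
      rw [hheads, pvOfListFresh _ _ hgnot]
      rw [List.map_cons, if_pos (by simp)]
      have hfilnil : (e :: r).filter (fun x => pvHead0 x == pvHead0 g) = [] := by
        rw [List.filter_eq_nil_iff]
        intro x hx hbx
        exact hgnot (pvHead0 x) (List.mem_map.mpr ⟨x, hx, rfl⟩) (by simpa using hbx)
      rw [hfilnil]
      simp only [List.flatMap_nil, List.append_nil]
      rw [List.append_assoc]
      simp only [List.singleton_append]
      congr 1
      congr 1
      apply List.map_congr_left
      intro k hk
      have hk' : k ∈ pvHead0 e :: pvHeads r := (PySem.Set.mem_ofList _ _).mp hk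
      have hkne : k ≠ pvHead0 g := hgnot k hk'
      by_cases hke : k = pvHead0 e
      · subst hke
        rw [if_pos (by simp), if_neg (by simp [hkne])]
        exact (pvGrp_cons_eq r e).symm
      · rw [if_neg (by simp [hke]), if_neg (by simp [hkne])]
        exact (pvGrp_cons_ne r e k (fun h => hke h.symm)).symm

theorem pvMergeSorted (s : List (List String)) (h : ∀ e ∈ s, e ≠ [])
    (hp : (pvHeads s).Pairwise (· ≤ ·)) :
    pvFinish (s.foldl pvSchritt ([], none))
      = (PySem.Set.ofList (pvHeads s)).map (pvGrp s) := by
  cases s with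
  | nil => rfl
  | cons e r =>
    have hee : e ≠ [] := h e (List.mem_cons_self ..)
    have hrne : ∀ x ∈ r, x ≠ [] := fun x hx => h x (List.mem_cons_of_mem _ hx)
    have hheads : pvHeads (e :: r) = pvHead0 e :: pvHeads r := rfl
    obtain ⟨hhe, hpr⟩ := List.pairwise_cons.mp (hheads ▸ hp)
    have hger : ∀ x ∈ r, pvHead0 e ≤ pvHead0 x := fun x hx =>
      hhe _ (List.mem_map.mpr ⟨x, hx, rfl⟩)
    rw [List.foldl_cons, show pvSchritt ([], none) e = ([], some e) from rfl,
      pvRun r [] e hee hrne hpr hger, List.nil_append, hheads]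
    apply List.map_congr_left
    intro k hk
    by_cases hke : k = pvHead0 e
    · subst hke
      rw [if_pos (by simp)]
      exact (pvGrp_cons_eq r e).symm
    · rw [if_neg (by simp [hke])]
      exact (pvGrp_cons_ne r e k (fun h => hke h.symm)).symm

-- first-insertion dedup is a sublist (so it inherits the sortedness of its source)
theorem pvOfListSublist (xs : List String) : (PySem.Set.ofList xs).Sublist xs := by
  induction xs with
  | nil => simp [PySem.Set.ofList]
  | cons x t ih =>
    rw [PySem.Set.ofList_cons]
    exact List.Sublist.cons₂ x (List.Sublist.trans (List.filter_sublist) ih)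

-- PySem.List.sorted does not depend on which Decidable instance witnesses the order
theorem pvSortedDecIrrel {α κ : Type} [LT κ] (d1 d2 : DecidableLT κ) (xs : List α)
    (key : α → κ) :
    @PySem.List.sorted α κ _ d1 xs key false = @PySem.List.sorted α κ _ d2 xs key false := by
  congr 1

-- ===== VERDICT (by name: the statement is the Claim_ definition above) =====
theorem kombiniere_listen_spec : Claim_equal_kombiniere_listen := by
  intro ll _ hpre
  show kombiniere_listen ll = kombiniere_listen_alt ll
  have hA : kombiniere_listen ll
      = PySem.List.sorted (ohne_duplikate (ll.flatMap (fun liste => liste))) (fun x => x)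
          false := by
    unfold kombiniere_listen
    rw [pvFlatten]
  set flat := ll.flatMap (fun liste => liste) with hflat
  have hne : ∀ e ∈ flat, e ≠ [] := by
    intro e he
    rcases List.mem_flatMap.mp he with ⟨l, hl, hel⟩
    exact hpre l hl e hel
  set s := PySem.List.sorted flat (fun e => pvHead0 e) false with hs
  have hBdef : kombiniere_listen_alt ll = pvFinish (s.foldl pvSchritt ([], none)) := rfl
  have hsperm : s.Perm flat := PySem.List.sorted_perm flat (fun e => pvHead0 e) false
  have hsne : ∀ e ∈ s, e ≠ [] := fun e he => hne e (hsperm.mem_iff.mp he)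
  have hsp : (pvHeads s).Pairwise (· ≤ ·) :=
    PySem.List.sorted_map_key_pairwise flat (fun e => pvHead0 e)
  have hgrp : ∀ k, pvGrp s k = pvGrp flat k := by
    intro k
    unfold pvGrp
    rw [show s.filter (fun e => pvHead0 e == k) = flat.filter (fun e => pvHead0 e == k) from
      pvSortedFilter flat k]
  have hmem : ∀ k, k ∈ PySem.Set.ofList (pvHeads s) ↔ k ∈ pvHeads flat := by
    intro k
    rw [PySem.Set.mem_ofList]
    exact (hsperm.map pvHead0).mem_iff
  have hperm : (PySem.Set.ofList (pvHeads s)).Perm (PySem.Set.ofList (pvHeads flat)) := by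
    rw [List.perm_ext_iff_of_nodup (PySem.Set.nodup_ofList _) (PySem.Set.nodup_ofList _)]
    intro a
    rw [hmem a, PySem.Set.mem_ofList]
  have hlt : (PySem.Set.ofList (pvHeads s)).Pairwise (· < ·) := by
    have h1 : (PySem.Set.ofList (pvHeads s)).Pairwise (· ≤ ·) :=
      List.Pairwise.sublist (pvOfListSublist (pvHeads s)) hsp
    exact (h1.and (PySem.Set.nodup_ofList _)).imp (fun hab => lt_of_le_of_ne hab.1 hab.2)
  have hpl : ((PySem.Set.ofList (pvHeads s)).map (pvGrp flat)).Pairwise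
      (fun a b => a < b) := by
    apply List.pairwise_map.mpr
    apply hlt.imp_of_mem
    intro k1 k2 hk1 hk2 hklt
    obtain ⟨t1, ht1⟩ := pvGrp_head flat k1 hne ((hmem k1).mp hk1)
    obtain ⟨t2, ht2⟩ := pvGrp_head flat k2 hne ((hmem k2).mp hk2)
    rw [ht1, ht2]
    exact List.Lex.rel hklt
  have hpermB : ((PySem.Set.ofList (pvHeads s)).map (pvGrp flat)).Perm
      ((PySem.Set.ofList (pvHeads flat)).map (pvGrp flat)) := hperm.map _
  rw [hA, hBdef, pvMergeSorted s hsne hsp,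
    List.map_congr_left (fun k _ => hgrp k), pvAChar flat hne]
  exact (pvSortedDecIrrel _ _ _ _).trans
    (PySem.List.sorted_eq_of_perm_of_pairwise_lt _ _ _ hpermB hpl)
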